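-- pv_equiv track=rewrite | github.com/NathanPerrine/DailyChallenge | AlumDailyChallenges/commonPlaces.py | commonPlaces
-- ===== SOURCE A (Python) =====
-- def commonPlaces(l1, l2):
--     possiblePlaces = {}
--     for index, r in enumerate(l1):
--         for index2, r2 in enumerate(l2):
--             if r == r2:
--                 possiblePlaces[r] = index + index2
--     finalPlaces = possiblePlaces.values()
--
--     final = [x for x in possiblePlaces.keys() if possiblePlaces[x] == min(finalPlaces)]
--     return final
-- ===== SOURCE B (Python) =====
-- def commonPlaces(l1, l2):
--     last2 = {}
--     for j, v in enumerate(l2):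
--         last2[v] = j
--     order = []
--     last1 = {}
--     for i, v in enumerate(l1):
--         if v in last2:
--             if v not in last1:
--                 order.append(v)
--             last1[v] = i
--     if not order:
--         return []
--     best = min(last1[v] + last2[v] for v in order)
--     return [v for v in order if last1[v] + last2[v] == best]
-- ===== Notes on version B (the rewrite author's own statement) =====
-- stated objective: faster
-- what changed: Replaces the nested l1-by-l2 scan (plus a min() recomputed for every key) with one pass over each list building last-index hash maps, then a single min pass over the common values.
import Mathlib
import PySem

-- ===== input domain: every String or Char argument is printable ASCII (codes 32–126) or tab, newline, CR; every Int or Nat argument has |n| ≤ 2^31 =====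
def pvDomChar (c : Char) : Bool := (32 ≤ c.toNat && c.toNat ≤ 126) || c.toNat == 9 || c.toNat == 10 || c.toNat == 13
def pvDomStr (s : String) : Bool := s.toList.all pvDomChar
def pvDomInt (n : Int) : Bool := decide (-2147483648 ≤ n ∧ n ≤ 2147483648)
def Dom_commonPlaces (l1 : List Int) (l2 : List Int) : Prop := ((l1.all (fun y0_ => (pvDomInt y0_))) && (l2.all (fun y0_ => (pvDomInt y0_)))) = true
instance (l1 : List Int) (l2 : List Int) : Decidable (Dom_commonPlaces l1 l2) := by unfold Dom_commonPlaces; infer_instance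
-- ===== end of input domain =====

-- B replaces A's nested l1×l2 scan (with min() recomputed per key) by one hashed
-- last-index pass over each list and a single min pass (objective: faster).

-- ===== PORT A =====
-- Python's min(finalPlaces) is only ever evaluated when possiblePlaces is nonempty
-- (the comprehension body runs at least once); ported as Option equality against
-- min?, which agrees exactly there and leaves the empty filter empty.
def commonPlaces (l1 : List Int) (l2 : List Int) : List Int :=
  let possiblePlaces : PySem.Dict Int Int :=
    (PySem.List.enumerate l1 0).foldl
      (fun d p =>
        (PySem.List.enumerate l2 0).foldl
          (fun d q => if p.2 == q.2 then d.insert p.2 (p.1 + q.1) else d) d)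
      PySem.Dict.empty
  possiblePlaces.keys.filter
    (fun x => some (possiblePlaces.getD x 0) ==
      PySem.List.min? possiblePlaces.values (fun y => y))

-- ===== PORT B =====
def commonPlaces_alt (l1 : List Int) (l2 : List Int) : List Int :=
  let last2 : PySem.Dict Int Int :=
    (PySem.List.enumerate l2 0).foldl (fun d q => d.insert q.2 q.1) PySem.Dict.empty
  let st :=
    (PySem.List.enumerate l1 0).foldl
      (fun (st : List Int × PySem.Dict Int Int) p =>
        if last2.contains p.2 then
          ((if st.2.contains p.2 then st.1 else st.1 ++ [p.2]), st.2.insert p.2 p.1)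
        else st)
      ([], PySem.Dict.empty)
  let order := st.1
  let last1 := st.2
  if order.isEmpty then []
  else
    match PySem.List.min? (order.map (fun v => last1.getD v 0 + last2.getD v 0)) (fun y => y) with
    | none => []
    | some best => order.filter (fun v => last1.getD v 0 + last2.getD v 0 == best)

-- ===== PRECONDITION & SPEC =====
def Spec_commonPlaces (l1 : List Int) (l2 : List Int) (out : List Int) : Prop := out = commonPlaces_alt l1 l2
instance (l1 : List Int) (l2 : List Int) (out : List Int) : Decidable (Spec_commonPlaces l1 l2 out) := by unfold Spec_commonPlaces; infer_instance

-- ===== CLAIM (what is proved, stated in full; the proofs are below) =====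
def Claim_equal_commonPlaces : Prop := ∀ (l1 : List Int) (l2 : List Int), Dom_commonPlaces l1 l2 → Spec_commonPlaces l1 l2 (commonPlaces l1 l2)

-- ===== LEMMAS AND PROOFS =====

/-- Index (0-based, offset by `s`) of the LAST occurrence of `r` in `l` (0 if absent). -/
def lastIdx (l : List Int) (s r : Int) : Int :=
  match l with
  | [] => 0
  | x :: xs => if r ∈ xs then lastIdx xs (s + 1) r else if r = x then s else 0

/-- A's inner loop over l2: its net effect is one overwrite at the last matching index. -/
theorem inner_fold (l2 : List Int) (r i s : Int) (d : PySem.Dict Int Int) :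
    (PySem.List.enumerate l2 s).foldl
      (fun d q => if r == q.2 then d.insert r (i + q.1) else d) d
    = if r ∈ l2 then d.insert r (i + lastIdx l2 s r) else d := by
  induction l2 generalizing s d with
  | nil => simp [PySem.List.enumerate_nil]
  | cons x xs ih =>
    simp only [PySem.List.enumerate_cons, List.foldl_cons, ih]
    by_cases hx : r = x
    · subst hx
      by_cases hxs : r ∈ xs <;>
        simp [lastIdx, hxs, PySem.Dict.insert_insert_self, List.mem_cons]
    · by_cases hxs : r ∈ xs <;> simp [lastIdx, hxs, hx, List.mem_cons]

/-- B's last2 dict stores the last index of each value of l2. -/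
theorem last2_getD (l2 : List Int) (s r : Int) (d0 : PySem.Dict Int Int) :
    ((PySem.List.enumerate l2 s).foldl (fun d q => d.insert q.2 q.1) d0).getD r 0
    = if r ∈ l2 then lastIdx l2 s r else d0.getD r 0 := by
  induction l2 generalizing s d0 with
  | nil => simp [PySem.List.enumerate_nil]
  | cons x xs ih =>
    simp only [PySem.List.enumerate_cons, List.foldl_cons, ih]
    by_cases hxs : r ∈ xs
    · simp [lastIdx, hxs, List.mem_cons]
    · by_cases hx : r = x <;>
        simp [lastIdx, hxs, hx, PySem.Dict.getD_insert, List.mem_cons]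

theorem last2_contains (l2 : List Int) (s r : Int) (d0 : PySem.Dict Int Int) :
    ((PySem.List.enumerate l2 s).foldl (fun d q => d.insert q.2 q.1) d0).contains r
    = (decide (r ∈ l2) || d0.contains r) := by
  induction l2 generalizing s d0 with
  | nil => simp [PySem.List.enumerate_nil]
  | cons x xs ih =>
    simp only [PySem.List.enumerate_cons, List.foldl_cons, ih,
      PySem.Dict.contains_insert, List.mem_cons]
    by_cases hxs : r ∈ xs
    · simp [hxs]
    · by_cases hx : r = x <;> simp [hxs, hx]

/-- Joint invariant through the two main loops: A's dict is exactly
    B's order list paired with last1+last2 sums. -/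
theorem main_fold (l2 l1 : List Int) (s : Int) (d last1 : PySem.Dict Int Int)
    (order : List Int)
    (h1 : d.items = order.map (fun w => (w, last1.getD w 0 + lastIdx l2 0 w)))
    (h3 : ∀ w, last1.contains w = decide (w ∈ order))
    (h4 : order.Nodup) (h5 : ∀ w ∈ order, w ∈ l2) :
    (((PySem.List.enumerate l1 s).foldl
        (fun d p =>
          (PySem.List.enumerate l2 0).foldl
            (fun d q => if p.2 == q.2 then d.insert p.2 (p.1 + q.1) else d) d) d).items
      = ((PySem.List.enumerate l1 s).foldl
          (fun (st : List Int × PySem.Dict Int Int) p =>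
            if p.2 ∈ l2 then
              ((if st.2.contains p.2 then st.1 else st.1 ++ [p.2]), st.2.insert p.2 p.1)
            else st)
          (order, last1)).1.map
          (fun w => (w, ((PySem.List.enumerate l1 s).foldl
            (fun (st : List Int × PySem.Dict Int Int) p =>
              if p.2 ∈ l2 then
                ((if st.2.contains p.2 then st.1 else st.1 ++ [p.2]), st.2.insert p.2 p.1)
              else st)
            (order, last1)).2.getD w 0 + lastIdx l2 0 w)))
    ∧ ((PySem.List.enumerate l1 s).foldl
          (fun (st : List Int × PySem.Dict Int Int) p =>
            if p.2 ∈ l2 then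
              ((if st.2.contains p.2 then st.1 else st.1 ++ [p.2]), st.2.insert p.2 p.1)
            else st)
          (order, last1)).1.Nodup
    ∧ (∀ w ∈ ((PySem.List.enumerate l1 s).foldl
          (fun (st : List Int × PySem.Dict Int Int) p =>
            if p.2 ∈ l2 then
              ((if st.2.contains p.2 then st.1 else st.1 ++ [p.2]), st.2.insert p.2 p.1)
            else st)
          (order, last1)).1, w ∈ l2) := by
  induction l1 generalizing s d last1 order with
  | nil =>
    simpa [PySem.List.enumerate_nil] using ⟨h1, h4, h5⟩
  | cons x xs ih =>
    have hkeys : d.keys = order := by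
      simp [PySem.Dict.keys, h1, Function.comp_def]
    have hdc : ∀ w, d.contains w = decide (w ∈ order) := by
      intro w; rw [PySem.Dict.contains_eq_decide_mem_keys, hkeys]
    simp only [PySem.List.enumerate_cons, List.foldl_cons]
    rw [inner_fold l2 x s 0 d]
    by_cases hmem : x ∈ l2
    · simp only [hmem, ite_true, h3]
      by_cases hxo : x ∈ order
      · have hcont : d.contains x = true := by rw [hdc]; simp [hxo]
        simp only [hxo, decide_true, ite_true]
        have h1' : (d.insert x (s + lastIdx l2 0 x)).items
            = order.map (fun w => (w, (last1.insert x s).getD w 0 + lastIdx l2 0 w)) := by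
          rw [PySem.Dict.items_insert_of_contains _ _ hcont, h1, List.map_map]
          refine List.map_congr_left (fun w hw => ?_)
          by_cases hwx : w = x
          · subst hwx; simp
          · simp [PySem.Dict.getD_insert, hwx]
        have h3' : ∀ w, (last1.insert x s).contains w = decide (w ∈ order) := by
          intro w
          rw [PySem.Dict.contains_insert, h3]
          by_cases hwx : w = x
          · subst hwx; simp [hxo]
          · simp [hwx]
        exact ih (s + 1) _ _ _ h1' h3' h4 h5
      · have hcont : d.contains x = false := by rw [hdc]; simp [hxo]
        simp only [hxo, decide_false]
        have h1' : (d.insert x (s + lastIdx l2 0 x)).items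
            = (order ++ [x]).map (fun w => (w, (last1.insert x s).getD w 0 + lastIdx l2 0 w)) := by
          rw [PySem.Dict.items_insert_of_not_contains _ _ hcont, h1, List.map_append]
          congr 1
          · refine List.map_congr_left (fun w hw => ?_)
            have hwx : w ≠ x := fun h => hxo (h ▸ hw)
            simp [PySem.Dict.getD_insert, hwx]
          · simp [PySem.Dict.getD_insert]
        have h3' : ∀ w, (last1.insert x s).contains w = decide (w ∈ order ++ [x]) := by
          intro w
          rw [PySem.Dict.contains_insert, h3]
          by_cases hwx : w = x
          · subst hwx; simp
          · simp [hwx]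
        have h4' : (order ++ [x]).Nodup := by
          refine List.Nodup.append h4 (List.nodup_singleton x) ?_
          intro a ha hax
          exact hxo ((List.mem_singleton.mp hax) ▸ ha)
        have h5' : ∀ w ∈ order ++ [x], w ∈ l2 := by
          intro w hw
          rcases List.mem_append.mp hw with h | h
          · exact h5 w h
          · have hwx : w = x := by simpa using h
            rw [hwx]; exact hmem
        exact ih (s + 1) _ _ _ h1' h3' h4' h5'
    · simp only [hmem, ite_false]
      exact ih (s + 1) _ _ _ h1 h3 h4 h5

-- ===== VERDICT (by name: the statement is the Claim_ definition above) =====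
theorem commonPlaces_spec : Claim_equal_commonPlaces := by
  intro l1 l2 _
  simp only [Spec_commonPlaces, commonPlaces, commonPlaces_alt]
  set L2 := (PySem.List.enumerate l2 0).foldl (fun d q => d.insert q.2 q.1)
      (PySem.Dict.empty : PySem.Dict Int Int) with hL2
  have hc : ∀ v, L2.contains v = decide (v ∈ l2) := by
    intro v; rw [hL2, last2_contains]; simp
  have hg : ∀ v, v ∈ l2 → L2.getD v 0 = lastIdx l2 0 v := by
    intro v hv; rw [hL2, last2_getD]; simp [hv]
  have hstep : (fun (st : List Int × PySem.Dict Int Int) (p : Int × Int) =>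
        if L2.contains p.2 then
          ((if st.2.contains p.2 then st.1 else st.1 ++ [p.2]), st.2.insert p.2 p.1)
        else st)
      = (fun (st : List Int × PySem.Dict Int Int) (p : Int × Int) =>
        if p.2 ∈ l2 then
          ((if st.2.contains p.2 then st.1 else st.1 ++ [p.2]), st.2.insert p.2 p.1)
        else st) := by
    funext st p; rw [hc]; simp only [decide_eq_true_eq]
  rw [hstep]
  set st := (PySem.List.enumerate l1 0).foldl
      (fun (st : List Int × PySem.Dict Int Int) p =>
        if p.2 ∈ l2 then
          ((if st.2.contains p.2 then st.1 else st.1 ++ [p.2]), st.2.insert p.2 p.1)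
        else st)
      ([], PySem.Dict.empty) with hst
  set dA := (PySem.List.enumerate l1 0).foldl
      (fun d p =>
        (PySem.List.enumerate l2 0).foldl
          (fun d q => if p.2 == q.2 then d.insert p.2 (p.1 + q.1) else d) d)
      (PySem.Dict.empty : PySem.Dict Int Int) with hdA
  obtain ⟨hitems, hnd, hsub⟩ := main_fold l2 l1 0 PySem.Dict.empty PySem.Dict.empty []
    (by rfl) (by simp) (by simp) (by simp)
  rw [← hst] at hitems hnd hsub
  rw [← hdA] at hitems
  have hkeysA : dA.keys = st.1 := by simp [PySem.Dict.keys, hitems, Function.comp_def]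
  have hvalsA : dA.values
      = st.1.map (fun w => st.2.getD w 0 + lastIdx l2 0 w) := by
    simp [PySem.Dict.values, hitems, Function.comp_def]
  have hndk : dA.keys.Nodup := hkeysA ▸ hnd
  have hget : ∀ x ∈ st.1, dA.getD x 0 = st.2.getD x 0 + lastIdx l2 0 x := by
    intro x hx
    exact PySem.Dict.getD_of_mem_items dA (by rw [hitems]; exact List.mem_map_of_mem hx) hndk 0
  have hmap : st.1.map (fun v => st.2.getD v 0 + L2.getD v 0)
      = st.1.map (fun w => st.2.getD w 0 + lastIdx l2 0 w) :=
    List.map_congr_left (fun v hv => by rw [hg v (hsub v hv)])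
  rw [hkeysA, hvalsA, hmap]
  rcases hE : st.1 with _ | ⟨a, rest⟩
  · simp
  · rw [hE] at hget hsub
    simp only [List.isEmpty_cons, Bool.false_eq_true, if_false, List.map_cons,
      PySem.List.min?_id_cons]
    refine List.filter_congr (fun x hx => ?_)
    rw [hget x hx, hg x (hsub x hx)]
    simp
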